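-- pv_equiv track=rewrite | github.com/DragunWF/Competitive-Programming | CodeWars/python/6_kyu/simple_fun_250.py | prefix_sums_to_suffix_sums
-- ===== SOURCE A (Python) =====
-- def prefix_sums_to_suffix_sums(prefix_sums: list[int]) -> int:
--     initial_arr = [prefix_sums[0]]
--     for i in range(1, len(prefix_sums)):
--         initial_arr.append(prefix_sums[i] - prefix_sums[i - 1])
--
--     total = sum(initial_arr)
--     suffix_sums = [total]
--     for i in range(len(initial_arr) - 1):
--         total -= initial_arr[i]
--         suffix_sums.append(total)
--     return suffix_sums
-- ===== SOURCE B (Python) =====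
-- def prefix_sums_to_suffix_sums(prefix_sums: list[int]) -> int:
--     total = prefix_sums[-1]
--     return [total] + [total - prefix_sums[k] for k in range(len(prefix_sums) - 1)]
-- ===== Notes on version B (the rewrite author's own statement) =====
-- stated objective: simpler
-- what changed: B drops A's reconstruction of the original array and the running-subtraction loop, using the closed form: the first suffix sum is the last prefix sum, and each later one is the last prefix sum minus the preceding prefix sum, in a single comprehension.
import Mathlib
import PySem

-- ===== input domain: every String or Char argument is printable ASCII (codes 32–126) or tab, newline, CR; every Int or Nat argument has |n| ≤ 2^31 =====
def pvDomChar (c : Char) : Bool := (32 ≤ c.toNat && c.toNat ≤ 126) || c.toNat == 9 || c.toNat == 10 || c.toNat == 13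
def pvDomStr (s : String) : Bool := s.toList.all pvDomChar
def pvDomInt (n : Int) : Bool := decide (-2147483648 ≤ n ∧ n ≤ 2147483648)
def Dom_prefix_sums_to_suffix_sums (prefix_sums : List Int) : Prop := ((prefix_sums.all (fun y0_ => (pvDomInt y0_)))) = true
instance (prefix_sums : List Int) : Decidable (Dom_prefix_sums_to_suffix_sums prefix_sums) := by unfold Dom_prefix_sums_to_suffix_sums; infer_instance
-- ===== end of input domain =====

-- B replaces A's two loops (reconstruct the original array, then running subtraction)
-- with a closed form: each suffix sum is the last prefix sum minus the preceding prefix sum;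
-- objective: simpler (one pass instead of two).

-- ===== PORT A =====
def prefix_sums_to_suffix_sums (prefix_sums : List Int) : List Int :=
  let initial_arr := (PySem.List.pyRange 1 prefix_sums.length 1).foldl
    (fun acc i => acc ++ [PySem.List.pyGetD prefix_sums i 0 - PySem.List.pyGetD prefix_sums (i - 1) 0])
    [PySem.List.pyGetD prefix_sums 0 0]
  let total := initial_arr.sum
  let st := (PySem.List.pyRange 0 ((initial_arr.length : Int) - 1) 1).foldl
    (fun (p : Int × List Int) i =>
      let t := p.1 - PySem.List.pyGetD initial_arr i 0
      (t, p.2 ++ [t]))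
    (total, [total])
  st.2

-- ===== PORT B =====
def prefix_sums_to_suffix_sums_alt (prefix_sums : List Int) : List Int :=
  let total := PySem.List.pyGetD prefix_sums (-1) 0
  [total] ++ (PySem.List.pyRange 0 ((prefix_sums.length : Int) - 1) 1).map
    (fun k => total - PySem.List.pyGetD prefix_sums k 0)

-- ===== PRECONDITION & SPEC =====
-- Pre_ excludes only the empty list, on which A raises IndexError (indexing the first element).
def Pre_prefix_sums_to_suffix_sums (prefix_sums : List Int) : Prop := prefix_sums ≠ []
instance (prefix_sums : List Int) : Decidable (Pre_prefix_sums_to_suffix_sums prefix_sums) := by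
  unfold Pre_prefix_sums_to_suffix_sums; infer_instance
def pvWitness_prefix_sums_to_suffix_sums : List Int := [3, 5, 6]

def Spec_prefix_sums_to_suffix_sums (prefix_sums : List Int) (out : List Int) : Prop := out = prefix_sums_to_suffix_sums_alt prefix_sums
instance (prefix_sums : List Int) (out : List Int) : Decidable (Spec_prefix_sums_to_suffix_sums prefix_sums out) := by unfold Spec_prefix_sums_to_suffix_sums; infer_instance

-- ===== CLAIM (what is proved, stated in full; the proofs are below) =====
def Claim_equal_prefix_sums_to_suffix_sums : Prop := ∀ (prefix_sums : List Int), Dom_prefix_sums_to_suffix_sums prefix_sums → Pre_prefix_sums_to_suffix_sums prefix_sums → Spec_prefix_sums_to_suffix_sums prefix_sums (prefix_sums_to_suffix_sums prefix_sums)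

-- ===== LEMMAS AND PROOFS =====

-- Telescoping: the partial sums of the reconstructed differences give back the prefix sums.
theorem pv_telescope (ps : List Int) (k : Nat) (hk : k < ps.length) :
    ps.getD 0 0 + ((List.range k).map (fun j => ps.getD (j + 1) 0 - ps.getD j 0)).sum
      = ps.getD k 0 := by
  induction k with
  | zero => simp
  | succ k ih =>
    have hk' : k < ps.length := Nat.lt_of_succ_lt hk
    rw [List.range_succ, List.map_append, List.sum_append]
    have := ih hk'
    simp only [List.map_cons, List.map_nil, List.sum_cons, List.sum_nil]
    omega

-- A's initial_arr in closed form.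
theorem pv_init_shape (ps : List Int) :
    (PySem.List.pyRange 1 ps.length 1).foldl
      (fun acc i => acc ++ [PySem.List.pyGetD ps i 0 - PySem.List.pyGetD ps (i - 1) 0])
      [PySem.List.pyGetD ps 0 0]
    = ps.getD 0 0 :: (List.range (ps.length - 1)).map
        (fun k => ps.getD (k + 1) 0 - ps.getD k 0) := by
  rw [PySem.List.foldl_append_singleton_eq_map, PySem.List.pyRange_one]
  rw [List.map_map]
  have hn : ((ps.length : Int) - 1).toNat = ps.length - 1 := by omega
  rw [hn, PySem.List.pyGetD_zero]
  refine congrArg _ (List.map_congr_left ?_)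
  intro k _
  have h1 : (1 : Int) + (k : Int) = ((k + 1 : Nat) : Int) := by push_cast; ring
  have h2 : (1 : Int) + (k : Int) - 1 = ((k : Nat) : Int) := by omega
  simp only [Function.comp_apply]
  rw [h2, h1, PySem.List.pyGetD_natCast, PySem.List.pyGetD_natCast]

-- A's second loop in closed form (generic in the array and the bound).
theorem pv_loop_shape (arr : List Int) (t0 : Int) (m : Nat) (hm : m ≤ arr.length) :
    (PySem.List.pyRange 0 (m : Int) 1).foldl
      (fun (p : Int × List Int) i =>
        let t := p.1 - PySem.List.pyGetD arr i 0
        (t, p.2 ++ [t]))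
      (t0, [t0])
    = (t0 - (arr.take m).sum,
       t0 :: (List.range m).map (fun k => t0 - (arr.take (k + 1)).sum)) := by
  induction m with
  | zero => simp [PySem.List.pyRange_one_eq_nil]
  | succ m ih =>
    have hm' : m ≤ arr.length := Nat.le_of_succ_le hm
    have hcast : ((m + 1 : Nat) : Int) = (m : Int) + 1 := by push_cast; ring
    rw [hcast, PySem.List.pyRange_one_succ_right (by positivity), List.foldl_append, ih hm']
    have hlt : m < arr.length := hm
    simp only [List.foldl_cons, List.foldl_nil, PySem.List.pyGetD_natCast,
      List.getD_eq_getElem?_getD, List.getElem?_eq_getElem hlt, Option.getD_some]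
    have heq : t0 - (List.take m arr).sum - arr[m] = t0 - (List.take (m + 1) arr).sum := by
      rw [List.sum_take_succ arr m hlt]; omega
    rw [heq, List.range_succ, List.map_append]
    simp

-- Partial sums of initial_arr are the original prefix sums.
theorem pv_take_sum (ps : List Int) (hps : ps ≠ []) (k : Nat) (hk : k ≤ ps.length - 1) :
    ((ps.getD 0 0 :: (List.range (ps.length - 1)).map
        (fun j => ps.getD (j + 1) 0 - ps.getD j 0)).take (k + 1)).sum
      = ps.getD k 0 := by
  have hlen : 1 ≤ ps.length := List.length_pos_of_ne_nil hps
  rw [List.take_succ_cons, List.sum_cons, ← List.map_take, List.take_range, min_eq_left hk]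
  exact pv_telescope ps k (by omega)

-- pyGetD at -1 is getD at the last position.
theorem pv_getD_neg_one (ps : List Int) (hps : ps ≠ []) :
    PySem.List.pyGetD ps (-1) 0 = ps.getD (ps.length - 1) 0 := by
  have hlen : 1 ≤ ps.length := List.length_pos_of_ne_nil hps
  rw [PySem.List.pyGetD_neg_one ps 0 hps, List.getLast_eq_getElem,
    List.getD_eq_getElem?_getD, List.getElem?_eq_getElem (by omega), Option.getD_some]

-- ===== VERDICT (by name: the statement is the Claim_ definition above) =====
theorem prefix_sums_to_suffix_sums_spec : Claim_equal_prefix_sums_to_suffix_sums := by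
  intro ps _ hpre
  have hps : ps ≠ [] := hpre
  have hlen : 1 ≤ ps.length := List.length_pos_of_ne_nil hps
  unfold Spec_prefix_sums_to_suffix_sums prefix_sums_to_suffix_sums prefix_sums_to_suffix_sums_alt
  dsimp only
  rw [pv_init_shape ps]
  set arr := ps.getD 0 0 :: (List.range (ps.length - 1)).map
      (fun k => ps.getD (k + 1) 0 - ps.getD k 0) with harr
  have harrlen : arr.length = ps.length := by
    simp [harr]; omega
  have hbound : ((arr.length : Int) - 1) = ((ps.length - 1 : Nat) : Int) := by
    rw [harrlen]; omega
  rw [hbound, pv_loop_shape arr arr.sum (ps.length - 1) (by omega)]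
  have htot : arr.sum = ps.getD (ps.length - 1) 0 := by
    have := pv_take_sum ps hps (ps.length - 1) (le_refl _)
    rw [← this, ← harr]
    have : ps.length - 1 + 1 = arr.length := by omega
    rw [this, List.take_length]
  simp only [htot]
  rw [pv_getD_neg_one ps hps]
  have hrange : ((ps.length : Int) - 1) = ((ps.length - 1 : Nat) : Int) := by omega
  rw [hrange, PySem.List.pyRange_one]
  simp only [sub_zero, Int.toNat_natCast, List.map_map]
  refine congrArg _ (List.map_congr_left ?_)
  intro k hk
  have hk' : k ≤ ps.length - 1 := Nat.le_of_lt (List.mem_range.mp hk)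
  rw [pv_take_sum ps hps k hk']
  simp [Function.comp]
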